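-- pv_equiv track=rewrite | github.com/mortyc126-debug/SHA | dimension/collision_8round.py | sha256_8rounds
-- ===== SOURCE A (Python) =====
-- MASK32 = 0xFFFFFFFF
--
-- K_const = [
--     0x428a2f98, 0x71374491, 0xb5c0fbcf, 0xe9b5dba5,
--     0x3956c25b, 0x59f111f1, 0x923f82a4, 0xab1c5ed5,
--     0xd807aa98, 0x12835b01, 0x243185be, 0x550c7dc3,
--     0x72be5d74, 0x80deb1fe, 0x9bdc06a7, 0xc19bf174,
-- ]
--
-- IV = [0x6a09e667, 0xbb67ae85, 0x3c6ef372, 0xa54ff53a,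
--       0x510e527f, 0x9b05688c, 0x1f83d9ab, 0x5be0cd19]
--
-- def rotr(x, n): return ((x >> n) | (x << (32 - n))) & MASK32
--
-- def add32(x, y): return (x + y) & MASK32
--
-- def Sigma0(x): return rotr(x, 2) ^ rotr(x, 13) ^ rotr(x, 22)
--
-- def Sigma1(x): return rotr(x, 6) ^ rotr(x, 11) ^ rotr(x, 25)
--
-- def Ch(e, f, g): return (e & f) ^ (~e & g) & MASK32
--
-- def Maj(a, b, c): return (a & b) ^ (a & c) ^ (b & c)
--
-- def sha256_8rounds(W16):
--     a,b,c,d,e,f,g,h = IV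
--     W = list(W16)
--     for r in range(8):
--         T1 = add32(add32(add32(add32(h, Sigma1(e)), Ch(e,f,g)), K_const[r]), W[r])
--         T2 = add32(Sigma0(a), Maj(a,b,c))
--         h,g,f,e = g,f,e,add32(d,T1)
--         d,c,b,a = c,b,a,add32(T1,T2)
--     return tuple(add32(IV[i], [a,b,c,d,e,f,g,h][i]) for i in range(8))
-- ===== SOURCE B (Python) =====
-- MASK32 = 0xFFFFFFFF
--
-- K_const = [
--     0x428a2f98, 0x71374491, 0xb5c0fbcf, 0xe9b5dba5,
--     0x3956c25b, 0x59f111f1, 0x923f82a4, 0xab1c5ed5,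
--     0xd807aa98, 0x12835b01, 0x243185be, 0x550c7dc3,
--     0x72be5d74, 0x80deb1fe, 0x9bdc06a7, 0xc19bf174,
-- ]
--
-- IV = [0x6a09e667, 0xbb67ae85, 0x3c6ef372, 0xa54ff53a,
--       0x510e527f, 0x9b05688c, 0x1f83d9ab, 0x5be0cd19]
--
-- def rotr(x, n): return ((x >> n) | (x << (32 - n))) & MASK32
--
-- def add32(x, y): return (x + y) & MASK32
--
-- def Sigma0(x): return rotr(x, 2) ^ rotr(x, 13) ^ rotr(x, 22)
--
-- def Sigma1(x): return rotr(x, 6) ^ rotr(x, 11) ^ rotr(x, 25)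
--
-- def Ch(e, f, g): return (e & f) ^ (~e & g) & MASK32
--
-- def Maj(a, b, c): return (a & b) ^ (a & c) ^ (b & c)
--
-- def sha256_8rounds(W16):
--     # Top-down recursive definition of the two round sequences a(r), e(r):
--     # no loop, no mutable registers; the final state is read off at r = 4..7.
--     W = list(W16)
--
--     def t1(r):
--         return add32(add32(add32(add32(e(r - 4), Sigma1(e(r - 1))),
--                                  Ch(e(r - 1), e(r - 2), e(r - 3))),
--                            K_const[r]), W[r])
--
--     def a(r):
--         if r < 0:
--             return IV[-1 - r]          # a(-1)=IV[0], ..., a(-4)=IV[3]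
--         return add32(t1(r), add32(Sigma0(a(r - 1)), Maj(a(r - 1), a(r - 2), a(r - 3))))
--
--     def e(r):
--         if r < 0:
--             return IV[3 - r]           # e(-1)=IV[4], ..., e(-4)=IV[7]
--         return add32(a(r - 4), t1(r))
--
--     final = [a(7), a(6), a(5), a(4), e(7), e(6), e(5), e(4)]
--     return tuple(add32(IV[i], final[i]) for i in range(8))
-- ===== Notes on version B (the rewrite author's own statement) =====
-- stated objective: alternative
-- what changed: B replaces A's iterative loop over eight rotating registers with a top-down recursive (non-memoized) definition of the two round sequences a(r) and e(r); the final digest is read off at rounds 4..7, with no loop and no mutable state.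
import Mathlib
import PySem

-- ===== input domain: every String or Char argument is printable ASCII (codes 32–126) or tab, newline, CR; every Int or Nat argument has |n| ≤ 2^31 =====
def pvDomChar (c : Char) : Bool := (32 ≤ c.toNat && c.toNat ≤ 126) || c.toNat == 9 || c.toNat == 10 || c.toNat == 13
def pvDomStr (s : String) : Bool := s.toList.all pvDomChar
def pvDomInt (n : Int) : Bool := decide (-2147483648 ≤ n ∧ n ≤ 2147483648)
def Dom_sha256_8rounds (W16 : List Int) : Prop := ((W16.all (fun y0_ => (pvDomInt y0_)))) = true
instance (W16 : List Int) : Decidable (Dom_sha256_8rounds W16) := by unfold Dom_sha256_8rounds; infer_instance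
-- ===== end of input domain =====

-- B replaces the iterative register loop with a top-down recursive definition of the two
-- round sequences a(r), e(r); no loop, no mutable state (objective: alternative).

-- ===== PORT A =====
-- shared constant tables and bit helpers (exact transliterations of the module globals)
def pvMASK32 : Int := 0xFFFFFFFF

def pvK : List Int :=
  [0x428a2f98, 0x71374491, 0xb5c0fbcf, 0xe9b5dba5,
   0x3956c25b, 0x59f111f1, 0x923f82a4, 0xab1c5ed5,
   0xd807aa98, 0x12835b01, 0x243185be, 0x550c7dc3,
   0x72be5d74, 0x80deb1fe, 0x9bdc06a7, 0xc19bf174]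

def pvIV : List Int :=
  [0x6a09e667, 0xbb67ae85, 0x3c6ef372, 0xa54ff53a,
   0x510e527f, 0x9b05688c, 0x1f83d9ab, 0x5be0cd19]

def pvRotr (x : Int) (n : Nat) : Int :=
  PySem.Int.band (PySem.Int.bor (x >>> n) (x <<< (32 - n))) pvMASK32

def pvAdd32 (x y : Int) : Int := PySem.Int.band (x + y) pvMASK32

def pvSigma0 (x : Int) : Int := PySem.Int.bxor (PySem.Int.bxor (pvRotr x 2) (pvRotr x 13)) (pvRotr x 22)

def pvSigma1 (x : Int) : Int := PySem.Int.bxor (PySem.Int.bxor (pvRotr x 6) (pvRotr x 11)) (pvRotr x 25)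

-- Python precedence: (e & f) ^ ((~e & g) & MASK32)
def pvCh (e f g : Int) : Int :=
  PySem.Int.bxor (PySem.Int.band e f) (PySem.Int.band (PySem.Int.band (Int.not e) g) pvMASK32)

def pvMaj (a b c : Int) : Int :=
  PySem.Int.bxor (PySem.Int.bxor (PySem.Int.band a b) (PySem.Int.band a c)) (PySem.Int.band b c)

-- the loop body of A: state (a,b,c,d,e,f,g,h), round index r
def pvStepA (W : List Int)
    (st : Int × Int × Int × Int × Int × Int × Int × Int) (r : Int) :
    Int × Int × Int × Int × Int × Int × Int × Int :=
  match st with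
  | (a, b, c, d, e, f, g, h) =>
    let T1 := pvAdd32 (pvAdd32 (pvAdd32 (pvAdd32 h (pvSigma1 e)) (pvCh e f g))
                (PySem.List.pyGetD pvK r 0)) (PySem.List.pyGetD W r 0)
    let T2 := pvAdd32 (pvSigma0 a) (pvMaj a b c)
    (pvAdd32 T1 T2, a, b, c, pvAdd32 d T1, e, f, g)

def sha256_8rounds (W16 : List Int) : List Int :=
  match (PySem.List.pyRange 0 8 1).foldl (pvStepA W16)
      (0x6a09e667, 0xbb67ae85, 0x3c6ef372, 0xa54ff53a,
       0x510e527f, 0x9b05688c, 0x1f83d9ab, 0x5be0cd19) with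
  | (a, b, c, d, e, f, g, h) =>
    (PySem.List.pyRange 0 8 1).map (fun i =>
      pvAdd32 (PySem.List.pyGetD pvIV i 0)
              (PySem.List.pyGetD ([a, b, c, d, e, f, g, h] : List Int) i 0))

-- ===== PORT B =====
-- B's recursive sequences a(r), e(r), t1(r), indices shifted by 4 so the base cases
-- a(-4)..a(-1) / e(-4)..e(-1) (the IV) sit at Nat indices 0..3.
mutual
def pvAF (W : List Int) (n : Nat) : Int :=
  match n with
  | 0 => 0xa54ff53a      -- a(-4) = IV[3]
  | 1 => 0x3c6ef372      -- a(-3) = IV[2]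
  | 2 => 0xbb67ae85      -- a(-2) = IV[1]
  | 3 => 0x6a09e667      -- a(-1) = IV[0]
  | m + 4 =>
      pvAdd32 (pvT1 W m)
        (pvAdd32 (pvSigma0 (pvAF W (m + 3)))
          (pvMaj (pvAF W (m + 3)) (pvAF W (m + 2)) (pvAF W (m + 1))))
termination_by 2 * n
decreasing_by all_goals omega

def pvEF (W : List Int) (n : Nat) : Int :=
  match n with
  | 0 => 0x5be0cd19      -- e(-4) = IV[7]
  | 1 => 0x1f83d9ab      -- e(-3) = IV[6]
  | 2 => 0x9b05688c      -- e(-2) = IV[5]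
  | 3 => 0x510e527f      -- e(-1) = IV[4]
  | m + 4 => pvAdd32 (pvAF W m) (pvT1 W m)
termination_by 2 * n
decreasing_by all_goals omega

def pvT1 (W : List Int) (n : Nat) : Int :=
  pvAdd32 (pvAdd32 (pvAdd32 (pvAdd32 (pvEF W n) (pvSigma1 (pvEF W (n + 3))))
      (pvCh (pvEF W (n + 3)) (pvEF W (n + 2)) (pvEF W (n + 1))))
      (PySem.List.pyGetD pvK (n : Int) 0)) (PySem.List.pyGetD W (n : Int) 0)
termination_by 2 * n + 7
decreasing_by all_goals omega
end

def sha256_8rounds_alt (W16 : List Int) : List Int :=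
  let final : List Int :=
    [pvAF W16 11, pvAF W16 10, pvAF W16 9, pvAF W16 8,
     pvEF W16 11, pvEF W16 10, pvEF W16 9, pvEF W16 8]
  (PySem.List.pyRange 0 8 1).map (fun i =>
    pvAdd32 (PySem.List.pyGetD pvIV i 0) (PySem.List.pyGetD final i 0))

-- ===== PRECONDITION & SPEC =====
-- Pre_ excludes lists with fewer than 8 elements: there Python A raises IndexError on W[r].
def Pre_sha256_8rounds (W16 : List Int) : Prop := 8 ≤ W16.length
instance (W16 : List Int) : Decidable (Pre_sha256_8rounds W16) := by
  unfold Pre_sha256_8rounds; infer_instance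

def pvWitness_sha256_8rounds : List Int := [0, 0, 0, 0, 0, 0, 0, 0]

def Spec_sha256_8rounds (W16 : List Int) (out : List Int) : Prop := out = sha256_8rounds_alt W16
instance (W16 : List Int) (out : List Int) : Decidable (Spec_sha256_8rounds W16 out) := by
  unfold Spec_sha256_8rounds; infer_instance

-- ===== CLAIM =====
def Claim_equal_sha256_8rounds : Prop := ∀ (W16 : List Int), Dom_sha256_8rounds W16 → Pre_sha256_8rounds W16 → Spec_sha256_8rounds W16 (sha256_8rounds W16)

-- ===== LEMMAS AND PROOFS =====

-- after k rounds, A's eight registers are exactly B's sequences at indices k+3 .. k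
theorem foldA_eq_seq (W : List Int) : ∀ k : Nat,
    (PySem.List.pyRange 0 k 1).foldl (pvStepA W)
      (0x6a09e667, 0xbb67ae85, 0x3c6ef372, 0xa54ff53a,
       0x510e527f, 0x9b05688c, 0x1f83d9ab, 0x5be0cd19) =
    (pvAF W (k + 3), pvAF W (k + 2), pvAF W (k + 1), pvAF W k,
     pvEF W (k + 3), pvEF W (k + 2), pvEF W (k + 1), pvEF W k) := by
  intro k
  induction k with
  | zero => simp [pvAF, pvEF]
  | succ k ih =>
      have hr : PySem.List.pyRange 0 ((k : Int) + 1) 1 =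
          PySem.List.pyRange 0 (k : Int) 1 ++ [(k : Int)] :=
        PySem.List.pyRange_one_succ_right (by positivity)
      have hcast : ((k + 1 : Nat) : Int) = (k : Int) + 1 := by push_cast; ring
      rw [hcast]
      rw [hr]
      rw [List.foldl_append]
      simp only [List.foldl_cons, List.foldl_nil]
      rw [ih]
      simp only [pvStepA]
      have hA : pvAF W (k + 4) =
          pvAdd32 (pvT1 W k)
            (pvAdd32 (pvSigma0 (pvAF W (k + 3)))
              (pvMaj (pvAF W (k + 3)) (pvAF W (k + 2)) (pvAF W (k + 1)))) := by
        rw [pvAF]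
      have hE : pvEF W (k + 4) = pvAdd32 (pvAF W k) (pvT1 W k) := by rw [pvEF]
      have hT : pvT1 W k =
          pvAdd32 (pvAdd32 (pvAdd32 (pvAdd32 (pvEF W k) (pvSigma1 (pvEF W (k + 3))))
            (pvCh (pvEF W (k + 3)) (pvEF W (k + 2)) (pvEF W (k + 1))))
            (PySem.List.pyGetD pvK (k : Int) 0)) (PySem.List.pyGetD W (k : Int) 0) := by
        rw [pvT1]
      simp only [show k + 1 + 3 = k + 4 from rfl, show k + 1 + 2 = k + 3 from rfl,
        show k + 1 + 1 = k + 2 from rfl, hA, hE, hT]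

-- ===== VERDICT =====
theorem sha256_8rounds_spec : Claim_equal_sha256_8rounds := by
  intro W16 _hdom _hpre
  unfold Spec_sha256_8rounds sha256_8rounds sha256_8rounds_alt
  rw [show (8 : Int) = ((8 : Nat) : Int) from rfl, foldA_eq_seq W16 8]
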